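-- pv_equiv track=rewrite | github.com/thkoch2001/tvlfyi_depot | scratch/facebook/language2.py | parse
-- ===== SOURCE A (Python) =====
-- def parse(tokens):
--     result = []
--     series = []
--     for token in tokens:
--         if token == '*':
--             continue
--         elif token == '+':
--             result.append(series)
--             series = []
--         else:
--             series.append(token)
--     if series:
--         result.append(series)
--     return result
-- ===== SOURCE B (Python) =====
-- def parse(tokens):
--     filtered = [t for t in tokens if t != '*']
--     result = []
--     start = 0
--     for i, t in enumerate(filtered):
--         if t == '+':
--             result.append(filtered[start:i])
--             start = i + 1
--     if start < len(filtered):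
--         result.append(filtered[start:])
--     return result
-- ===== Notes on version B (the rewrite author's own statement) =====
-- stated objective: alternative
-- what changed: B first filters out '*' tokens, then splits the filtered list by index with a start pointer and slices filtered[start:i] at each '+', appending the final slice only when start < len(filtered), instead of A's single pass that accumulates a running series list.
import Mathlib
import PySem

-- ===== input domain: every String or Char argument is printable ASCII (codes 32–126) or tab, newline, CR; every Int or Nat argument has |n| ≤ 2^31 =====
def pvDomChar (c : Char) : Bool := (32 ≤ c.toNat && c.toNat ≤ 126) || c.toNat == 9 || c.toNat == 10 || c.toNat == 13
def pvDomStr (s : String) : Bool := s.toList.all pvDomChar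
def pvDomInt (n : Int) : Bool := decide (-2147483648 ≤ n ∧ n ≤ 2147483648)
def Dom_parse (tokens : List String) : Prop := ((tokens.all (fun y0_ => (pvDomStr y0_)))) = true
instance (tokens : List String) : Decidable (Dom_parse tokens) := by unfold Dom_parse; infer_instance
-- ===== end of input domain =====

-- B filters '*' first and then splits the filtered list by index with slices; same value as A, alternative decomposition.

-- ===== PORT A =====
-- loop body of A: skip '*', flush series on '+', else extend series
def parseStepA (st : List (List String) × List String) (token : String) :
    List (List String) × List String :=
  if token = "*" then st
  else if token = "+" then (st.1 ++ [st.2], [])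
  else (st.1, st.2 ++ [token])

def parse (tokens : List String) : List (List String) :=
  let st := tokens.foldl parseStepA ([], [])
  if st.2 ≠ [] then st.1 ++ [st.2] else st.1

-- ===== PORT B =====
-- loop body of B: on '+', append filtered[start:i] and set start := i+1
def parseAltStep (filtered : List String) (st : List (List String) × Int)
    (p : Int × String) : List (List String) × Int :=
  if p.2 = "+" then (st.1 ++ [PySem.List.slice filtered (some st.2) (some p.1)], p.1 + 1)
  else st

def parse_alt (tokens : List String) : List (List String) :=
  let filtered := tokens.filter (fun t => t ≠ "*")
  let st := (PySem.List.enumerate filtered 0).foldl (parseAltStep filtered) ([], 0)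
  if st.2 < (filtered.length : Int) then st.1 ++ [PySem.List.slice filtered (some st.2) none]
  else st.1

-- ===== CLAIM (what is proved, stated in full; the proofs are below) =====
def Spec_parse (tokens : List String) (out : List (List String)) : Prop := out = parse_alt tokens
instance (tokens : List String) (out : List (List String)) : Decidable (Spec_parse tokens out) := by unfold Spec_parse; infer_instance

def Claim_equal_parse : Prop := ∀ (tokens : List String), Dom_parse tokens → Spec_parse tokens (parse tokens)

-- ===== LEMMAS AND PROOFS =====

-- reference splitter on the '*'-free list
def refSplit : List String → List String → List (List String)
  | [], ser => if ser = [] then [] else [ser]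
  | t :: ts, ser => if t = "+" then ser :: refSplit ts [] else refSplit ts (ser ++ [t])

lemma parseA_loop (l : List String) (res : List (List String)) (ser : List String) :
    (let st := l.foldl parseStepA (res, ser)
     if st.2 ≠ [] then st.1 ++ [st.2] else st.1)
      = res ++ refSplit (l.filter (fun t => t ≠ "*")) ser := by
  induction l generalizing res ser with
  | nil =>
    simp only [List.foldl_nil, List.filter_nil, refSplit]
    split_ifs with h h' <;> simp_all
  | cons t ts ih =>
    rw [List.foldl_cons, List.filter_cons]
    by_cases h1 : t = "*"
    · rw [show parseStepA (res, ser) t = (res, ser) from by simp [parseStepA, h1]]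
      rw [ih]
      simp [h1]
    · by_cases h2 : t = "+"
      · rw [show parseStepA (res, ser) t = (res ++ [ser], []) from by simp [parseStepA, h2]]
        rw [ih]
        simp [h2, refSplit]
      · rw [show parseStepA (res, ser) t = (res, ser ++ [t]) from by simp [parseStepA, h1, h2]]
        rw [ih]
        simp [h1, h2, refSplit]

lemma parseB_loop (u : List String) (n : ℕ) : ∀ (k s : ℕ), k + n = u.length → s ≤ k →
    (let st := (PySem.List.enumerate (u.drop k) (k : Int)).foldl (parseAltStep u)
        (res, (s : Int))
     if st.2 < (u.length : Int) then st.1 ++ [PySem.List.slice u (some st.2) none] else st.1)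
      = res ++ refSplit (u.drop k) ((u.drop s).take (k - s)) := by
  induction n generalizing res with
  | zero =>
    intro k s hk hs
    have hk' : k = u.length := by omega
    subst hk'
    simp only [List.drop_length, PySem.List.enumerate_nil, List.foldl_nil, refSplit]
    by_cases hsl : s < u.length
    · have hne : (u.drop s).take (u.length - s) ≠ [] := by
        simp
        omega
      simp only [hne]
      rw [if_pos (by exact_mod_cast hsl)]
      rw [PySem.List.slice_from_natCast]
      simp [List.take_of_length_le, List.length_drop]
    · have hs' : s = u.length := by omega
      subst hs'
      simp
  | succ m ih =>
    intro k s hk hs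
    have hklt : k < u.length := by omega
    have hdrop : u.drop k = u[k] :: u.drop (k + 1) := List.drop_eq_getElem_cons hklt
    rw [hdrop, PySem.List.enumerate_cons, List.foldl_cons]
    by_cases hplus : u[k] = "+"
    · simp only [parseAltStep, hplus, reduceIte]
      have := ih (res := res ++ [PySem.List.slice u (some (s : Int)) (some (k : Int))])
        (k + 1) (k + 1) (by omega) (le_refl _)
      push_cast at this ⊢
      rw [this]
      simp only [Nat.sub_self, List.take_zero, refSplit, reduceIte]
      rw [PySem.List.slice_natCast]
      simp
    · simp only [parseAltStep, hplus, reduceIte]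
      have := ih (res := res) (k + 1) s (by omega) (by omega)
      push_cast at this ⊢
      rw [this]
      simp only [refSplit, if_neg hplus]
      congr 1
      congr 1
      have h1 : k - s < (u.drop s).length := by simp [List.length_drop]; omega
      have : (u.drop s).take (k + 1 - s) = (u.drop s).take (k - s) ++ [(u.drop s)[k - s]] := by
        rw [show k + 1 - s = (k - s) + 1 by omega, List.take_add_one]
        simp [List.getElem?_eq_getElem h1]
      rw [this]
      congr 1
      simp [List.getElem_drop]
      congr 1
      omega

theorem parse_eq_alt (tokens : List String) : parse tokens = parse_alt tokens := by
  unfold parse parse_alt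
  rw [parseA_loop tokens [] []]
  have := parseB_loop (res := ([] : List (List String)))
    (tokens.filter (fun t => t ≠ "*")) (tokens.filter (fun t => t ≠ "*")).length 0 0
    (by omega) (by omega)
  simp only [Nat.cast_zero, List.drop_zero, Nat.sub_zero, List.take_zero] at this
  rw [this]

-- ===== VERDICT (by name: the statement is the Claim_ definition above) =====
theorem parse_spec : Claim_equal_parse := by
  intro tokens _
  unfold Spec_parse
  exact parse_eq_alt tokens
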